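-- pv_equiv track=rewrite | github.com/dzy1011/Uni-ToD | utils/preprocess_conversation.py | knowledge_to_sequence
-- ===== SOURCE A (Python) =====
-- def knowledge_to_sequence(kg):
--     kg_dict0 = dict()
--     kg_dict1 = dict()
--     for triple in kg:
--         if triple[0] not in kg_dict0:
--             kg_dict0[triple[0]] = [triple[0],triple[-1]]
--         else:
--             kg_dict0[triple[0]].append(triple[-1])
--
--     for triple in kg:
--         if triple[0] not in kg_dict1:
--             kg_dict1[triple[0]] = [triple]
--         else:
--             kg_dict1[triple[0]].append(triple)
--     return  kg_dict0.copy(), kg_dict1.copy()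
-- ===== SOURCE B (Python) =====
-- def knowledge_to_sequence(kg):
--     # Collect the distinct head entities in first-occurrence order, then for each
--     # key scan kg once to gather its group and emit both dict entries from it.
--     keys = []
--     for triple in kg:
--         if triple[0] not in keys:
--             keys.append(triple[0])
--     kg_dict0 = {}
--     kg_dict1 = {}
--     for k in keys:
--         group = [t for t in kg if t[0] == k]
--         kg_dict0[k] = [k] + [t[-1] for t in group]
--         kg_dict1[k] = group
--     return kg_dict0, kg_dict1
-- ===== Notes on version B (the rewrite author's own statement) =====
-- stated objective: alternative
-- what changed: B never updates a dict incrementally: it first collects the distinct head entities in first-occurrence order, then for each key filters kg for that key's group and writes both dict entries directly from the group, replacing A's two element-driven dict-update scans with a key-driven gather.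
import Mathlib
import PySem

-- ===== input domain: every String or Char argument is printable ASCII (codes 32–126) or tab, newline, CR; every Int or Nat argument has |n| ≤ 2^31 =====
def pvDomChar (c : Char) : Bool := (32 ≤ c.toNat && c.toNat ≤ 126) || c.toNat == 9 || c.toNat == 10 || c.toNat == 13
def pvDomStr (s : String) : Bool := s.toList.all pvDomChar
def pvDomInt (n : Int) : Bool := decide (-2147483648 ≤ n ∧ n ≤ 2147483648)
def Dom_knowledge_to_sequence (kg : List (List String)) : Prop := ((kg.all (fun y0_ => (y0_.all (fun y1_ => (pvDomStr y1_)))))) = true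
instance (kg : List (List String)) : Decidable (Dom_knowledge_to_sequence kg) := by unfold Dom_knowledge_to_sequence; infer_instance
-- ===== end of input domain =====

-- B is key-driven: it collects the distinct heads first, then gathers each key's group by
-- filtering kg, instead of A's element-driven incremental dict updates; alternative, same result.
-- triple[0] / triple[-1]; the .getD "" default is unreachable under Pre_ (every triple nonempty)
def pvHead (t : List String) : String := (PySem.List.pyGet? t 0).getD ""
def pvLast (t : List String) : String := (PySem.List.pyGet? t (-1)).getD ""

-- ===== PORT A =====
def knowledge_to_sequence (kg : List (List String)) : (List (String × List String)) × (List (String × List (List String))) :=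
  let kg_dict0 : PySem.Dict String (List String) :=
    kg.foldl (fun d t =>
      if d.contains (pvHead t) then d.insert (pvHead t) (d.getD (pvHead t) [] ++ [pvLast t])
      else d.insert (pvHead t) [pvHead t, pvLast t]) PySem.Dict.empty
  let kg_dict1 : PySem.Dict String (List (List String)) :=
    kg.foldl (fun d t =>
      if d.contains (pvHead t) then d.insert (pvHead t) (d.getD (pvHead t) [] ++ [t])
      else d.insert (pvHead t) [t]) PySem.Dict.empty
  (kg_dict0.items, kg_dict1.items)

-- ===== PORT B =====
def knowledge_to_sequence_alt (kg : List (List String)) : (List (String × List String)) × (List (String × List (List String))) :=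
  -- keys: distinct heads in first-occurrence order (list membership test, as in Source B)
  let keys : List String :=
    kg.foldl (fun ks t => if ks.contains (pvHead t) then ks else ks ++ [pvHead t]) []
  -- one loop over keys filling both dicts from the filtered group
  let p : PySem.Dict String (List String) × PySem.Dict String (List (List String)) :=
    keys.foldl (fun p k =>
      let group := kg.filter (fun t => pvHead t == k)
      (p.1.insert k (k :: group.map pvLast), p.2.insert k group))
      (PySem.Dict.empty, PySem.Dict.empty)
  (p.1.items, p.2.items)

-- ===== PRECONDITION & SPEC =====
-- Pre_ excludes kg containing an empty triple: there Python A raises IndexError on triple[0] (B raises too).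
def Pre_knowledge_to_sequence (kg : List (List String)) : Prop := ∀ t ∈ kg, t ≠ []
instance (kg : List (List String)) : Decidable (Pre_knowledge_to_sequence kg) := by unfold Pre_knowledge_to_sequence; infer_instance
def pvWitness_knowledge_to_sequence : List (List String) := [["a", "r", "b"], ["a", "s", "c"], ["x", "y", "z"]]
def Spec_knowledge_to_sequence (kg : List (List String)) (out : (List (String × List String)) × (List (String × List (List String)))) : Prop := out = knowledge_to_sequence_alt kg
instance (kg : List (List String)) (out : (List (String × List String)) × (List (String × List (List String)))) : Decidable (Spec_knowledge_to_sequence kg out) := by unfold Spec_knowledge_to_sequence; infer_instance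

-- ===== CLAIM (what is proved, stated in full; the proofs are below) =====
def Claim_equal_knowledge_to_sequence : Prop := ∀ (kg : List (List String)), Dom_knowledge_to_sequence kg → Pre_knowledge_to_sequence kg → Spec_knowledge_to_sequence kg (knowledge_to_sequence kg)

-- ===== LEMMAS AND PROOFS =====

-- the canonical forms both sides reduce to
def pvKeys (kg : List (List String)) : List String := PySem.Set.ofList (kg.map pvHead)
def pvGroup (kg : List (List String)) (k : String) : List (List String) :=
  kg.filter (fun t => pvHead t == k)

-- A's kg_dict1 step is a modify step
lemma step1_eq (d : PySem.Dict String (List (List String))) (t : List String) :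
    (if d.contains (pvHead t) then d.insert (pvHead t) (d.getD (pvHead t) [] ++ [t])
     else d.insert (pvHead t) [t]) = d.modify (pvHead t) [] (· ++ [t]) := by
  unfold PySem.Dict.modify
  by_cases h : d.contains (pvHead t) = true
  · simp [h]
  · have h' : d.contains (pvHead t) = false := by simpa using h
    simp [h', PySem.Dict.getD_of_not_contains _ _ h']

-- A's kg_dict1 loop yields the canonical grouping items
lemma A1_items (kg : List (List String)) :
    (kg.foldl (fun d t =>
      if d.contains (pvHead t) then d.insert (pvHead t) (d.getD (pvHead t) [] ++ [t])
      else d.insert (pvHead t) [t]) PySem.Dict.empty).items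
    = (pvKeys kg).map (fun k => (k, pvGroup kg k)) := by
  have hstep : kg.foldl (fun d t =>
      if d.contains (pvHead t) then d.insert (pvHead t) (d.getD (pvHead t) [] ++ [t])
      else d.insert (pvHead t) [t]) PySem.Dict.empty
      = kg.foldl (fun d t => d.modify (pvHead t) [] (· ++ [t])) PySem.Dict.empty := by
    congr 1; funext d t; exact step1_eq d t
  rw [hstep]
  set D := kg.foldl (fun d t => d.modify (pvHead t) [] (· ++ [t])) PySem.Dict.empty with hD
  have hkeys : D.keys = pvKeys kg := by
    rw [hD, PySem.Dict.keys_foldl_modify_key]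
    simp [PySem.Dict.keys_empty, PySem.Set.update_nil_left, pvKeys]
  have hnd : D.keys.Nodup := by
    rw [hD]; exact PySem.Dict.nodup_keys_foldl_modify_key _ _ _ _ _ PySem.Dict.nodup_keys_empty
  have hget : ∀ k, D.getD k [] = pvGroup kg k := by
    intro k
    have hmap : D = (kg.map (fun t => (pvHead t, t))).foldl
        (fun d p => d.modify p.1 [] (· ++ [p.2])) PySem.Dict.empty := by
      rw [hD, List.foldl_map]
    rw [hmap, PySem.Dict.getD_foldl_modify_append]
    simp [pvGroup, List.filter_map, Function.comp_def]
  rw [PySem.Dict.items_eq_map_keys D hnd ([] : List (List String)), hkeys]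
  exact List.map_congr_left (fun k _ => by rw [hget k])

-- the value-projection relating A's kg_dict0 to its kg_dict1
def pvProj (p : String × List (List String)) : String × List String := (p.1, p.1 :: p.2.map pvLast)

lemma get?_mk_map_proj (l : List (String × List (List String))) (k : String) :
    (PySem.Dict.mk (l.map pvProj)).get? k =
      ((PySem.Dict.mk l).get? k).map (fun v => k :: v.map pvLast) := by
  induction l with
  | nil => simp [PySem.Dict.get?]
  | cons p rest ih =>
    rcases p with ⟨a, v⟩
    by_cases h : a = k
    · subst h
      simp [pvProj, PySem.Dict.get?_mk_cons]
    · simp [pvProj, PySem.Dict.get?_mk_cons, h, ih]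

lemma contains_mk_map_proj (l : List (String × List (List String))) (k : String) :
    (PySem.Dict.mk (l.map pvProj)).contains k = (PySem.Dict.mk l).contains k := by
  show (l.map pvProj).any (fun p => p.1 == k) = l.any (fun p => p.1 == k)
  induction l with
  | nil => rfl
  | cons p rest ih => simp only [List.map_cons, List.any_cons, ih]; rfl

-- one step of A's kg_dict0 loop on the projected dict = projection of one modify step
lemma step0_proj (d : PySem.Dict String (List (List String))) (t : List String) :
    (if (PySem.Dict.mk (d.items.map pvProj)).contains (pvHead t) then
       (PySem.Dict.mk (d.items.map pvProj)).insert (pvHead t)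
         ((PySem.Dict.mk (d.items.map pvProj)).getD (pvHead t) [] ++ [pvLast t])
     else (PySem.Dict.mk (d.items.map pvProj)).insert (pvHead t) [pvHead t, pvLast t])
    = PySem.Dict.mk ((d.modify (pvHead t) [] (· ++ [t])).items.map pvProj) := by
  set k := pvHead t with hk
  by_cases h : d.contains k = true
  · obtain ⟨v, hv⟩ : ∃ v, d.get? k = some v := by
      rcases ho : d.get? k with _ | v
      · rw [PySem.Dict.contains_eq_isSome_get?, ho] at h; simp at h
      · exact ⟨v, rfl⟩
    have hc : (PySem.Dict.mk (d.items.map pvProj)).contains k = true := by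
      rw [contains_mk_map_proj]; exact h
    have hgd : (PySem.Dict.mk (d.items.map pvProj)).getD k [] = k :: v.map pvLast := by
      unfold PySem.Dict.getD
      rw [get?_mk_map_proj]
      have : (PySem.Dict.mk d.items).get? k = d.get? k := rfl
      rw [this, hv]; rfl
    rw [if_pos hc]
    unfold PySem.Dict.modify PySem.Dict.insert
    rw [if_pos hc, if_pos h]
    have hgd' : d.getD k [] = v := by unfold PySem.Dict.getD; rw [hv]; rfl
    rw [hgd, hgd']
    congr 1
    rw [List.map_map, List.map_map]
    apply List.map_congr_left
    intro p _
    by_cases hp : p.1 == k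
    · simp [Function.comp, pvProj, hp]
    · simp [Function.comp, pvProj, hp]
  · have h' : d.contains k = false := by simpa using h
    have hc : (PySem.Dict.mk (d.items.map pvProj)).contains k = false := by
      rw [contains_mk_map_proj]; exact h'
    rw [if_neg (by simp [hc])]
    unfold PySem.Dict.modify PySem.Dict.insert
    rw [if_neg (by simp [hc]), if_neg (by simp [h'])]
    simp [pvProj, PySem.Dict.getD_of_not_contains _ _ h']

-- A's kg_dict0 loop, started on the projection of d, computes the projection of the modify loop
lemma fold0_proj (kg : List (List String)) : ∀ (d : PySem.Dict String (List (List String))),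
    kg.foldl (fun d t =>
      if d.contains (pvHead t) then d.insert (pvHead t) (d.getD (pvHead t) [] ++ [pvLast t])
      else d.insert (pvHead t) [pvHead t, pvLast t]) (PySem.Dict.mk (d.items.map pvProj))
    = PySem.Dict.mk ((kg.foldl (fun d t => d.modify (pvHead t) [] (· ++ [t])) d).items.map pvProj) := by
  induction kg with
  | nil => intro d; simp
  | cons t rest ih =>
    intro d
    simp only [List.foldl_cons]
    rw [step0_proj d t]
    exact ih _

-- A's kg_dict0 items are the projection of the canonical grouping items
lemma A0_items (kg : List (List String)) :
    (kg.foldl (fun d t =>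
      if d.contains (pvHead t) then d.insert (pvHead t) (d.getD (pvHead t) [] ++ [pvLast t])
      else d.insert (pvHead t) [pvHead t, pvLast t]) PySem.Dict.empty).items
    = (pvKeys kg).map (fun k => (k, k :: (pvGroup kg k).map pvLast)) := by
  have h0 := fold0_proj kg PySem.Dict.empty
  have he : PySem.Dict.mk (((PySem.Dict.empty : PySem.Dict String (List (List String))).items).map pvProj)
      = (PySem.Dict.empty : PySem.Dict String (List String)) := rfl
  rw [he] at h0
  have := congrArg PySem.Dict.items h0
  rw [this]
  have h1 : (kg.foldl (fun d t => d.modify (pvHead t) [] (· ++ [t])) PySem.Dict.empty).items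
      = (pvKeys kg).map (fun k => (k, pvGroup kg k)) := by
    rw [← A1_items kg]
    congr 1
    congr 1
    funext d t
    exact (step1_eq d t).symm
  show ((kg.foldl (fun d t => d.modify (pvHead t) [] (· ++ [t])) PySem.Dict.empty).items.map pvProj) = _
  rw [h1, List.map_map]
  exact List.map_congr_left (fun k _ => rfl)

-- B's keys loop is Set.ofList of the heads
lemma B_keys (kg : List (List String)) :
    kg.foldl (fun ks t => if ks.contains (pvHead t) then ks else ks ++ [pvHead t]) []
    = pvKeys kg := by
  rw [pvKeys, ← PySem.Set.update_nil_left, PySem.Set.update_map_eq_foldl_add]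
  rfl

-- B's pair fold splits into two independent folds
lemma pair_fold_split {α : Type} (ks : List α)
    (f : PySem.Dict String (List String) → α → PySem.Dict String (List String))
    (g : PySem.Dict String (List (List String)) → α → PySem.Dict String (List (List String)))
    (a : PySem.Dict String (List String)) (b : PySem.Dict String (List (List String))) :
    ks.foldl (fun p k => (f p.1 k, g p.2 k)) (a, b) = (ks.foldl f a, ks.foldl g b) := by
  induction ks generalizing a b with
  | nil => rfl
  | cons k rest ih => simp only [List.foldl_cons]; exact ih _ _

-- ===== VERDICT (by name: the statement is the Claim_ definition above) =====
theorem knowledge_to_sequence_spec : Claim_equal_knowledge_to_sequence := by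
  intro kg _ _
  unfold Spec_knowledge_to_sequence knowledge_to_sequence knowledge_to_sequence_alt
  show ((kg.foldl (fun d t =>
          if d.contains (pvHead t) then d.insert (pvHead t) (d.getD (pvHead t) [] ++ [pvLast t])
          else d.insert (pvHead t) [pvHead t, pvLast t]) PySem.Dict.empty).items,
        (kg.foldl (fun d t =>
          if d.contains (pvHead t) then d.insert (pvHead t) (d.getD (pvHead t) [] ++ [t])
          else d.insert (pvHead t) [t]) PySem.Dict.empty).items)
      = (((kg.foldl (fun ks t => if ks.contains (pvHead t) then ks else ks ++ [pvHead t]) []).foldl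
            (fun p k => (p.1.insert k (k :: (kg.filter (fun t => pvHead t == k)).map pvLast),
                         p.2.insert k (kg.filter (fun t => pvHead t == k))))
            (PySem.Dict.empty, PySem.Dict.empty)).1.items,
         ((kg.foldl (fun ks t => if ks.contains (pvHead t) then ks else ks ++ [pvHead t]) []).foldl
            (fun p k => (p.1.insert k (k :: (kg.filter (fun t => pvHead t == k)).map pvLast),
                         p.2.insert k (kg.filter (fun t => pvHead t == k))))
            (PySem.Dict.empty, PySem.Dict.empty)).2.items)
  rw [B_keys kg, pair_fold_split (pvKeys kg)
      (fun d k => d.insert k (k :: (kg.filter (fun t => pvHead t == k)).map pvLast))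
      (fun d k => d.insert k (kg.filter (fun t => pvHead t == k)))
      PySem.Dict.empty PySem.Dict.empty]
  have hfresh0 : ∀ a ∈ pvKeys kg,
      (PySem.Dict.empty : PySem.Dict String (List String)).contains a = false := by
    intro a _; exact PySem.Dict.contains_empty a
  have hfresh1 : ∀ a ∈ pvKeys kg,
      (PySem.Dict.empty : PySem.Dict String (List (List String))).contains a = false := by
    intro a _; exact PySem.Dict.contains_empty a
  have hnd : ((pvKeys kg).map id).Nodup := by
    rw [List.map_id]; exact PySem.Set.nodup_ofList (kg.map pvHead)
  have hB0 := PySem.Dict.items_foldl_insert_fresh (l := pvKeys kg) (k := id)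
      (v := fun k => k :: (kg.filter (fun t => pvHead t == k)).map pvLast)
      (d := PySem.Dict.empty) hfresh0 hnd
  have hB1 := PySem.Dict.items_foldl_insert_fresh (l := pvKeys kg) (k := id)
      (v := fun k => kg.filter (fun t => pvHead t == k))
      (d := PySem.Dict.empty) hfresh1 hnd
  simp only [id] at hB0 hB1
  refine Prod.ext ?_ ?_
  · show (kg.foldl _ PySem.Dict.empty).items = _
    rw [A0_items kg]
    rw [hB0]
    rfl
  · show (kg.foldl _ PySem.Dict.empty).items = _
    rw [A1_items kg]
    rw [hB1]
    rfl
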